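-- pv_equiv track=rewrite | github.com/ngjoseph/fbref-scrapy | fbref_scrapy/helpers.py | select_top_priority
-- ===== SOURCE A (Python) =====
-- def select_top_priority(items: dict, priority: list) -> list:
--     """Recursively remove items from a list based on the passed priority order,
--     until only a single item remains in the list.
--
--     Args:
--         items (list): List of values to narrow down to single value
--         priority (list): List of values in order low priority -> high priority
--
--     Returns:
--         [list]: List containing a single item
--     """
--
--     # Create copies of mutable list arguments
--     items_copy = list(items[:])
--     priority_copy = list(priority[:])
--
--     if len(items_copy) == 1:
--         return items_copy[0]  # Return single item
--
--     for p in priority_copy: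
--         if p in items_copy:
--             # If low priority item found, remove and recursively repeat
--             items_copy.remove(p)
--             priority_copy.remove(p)
--             return select_top_priority(items_copy, priority_copy)
-- ===== SOURCE B (Python) =====
-- def select_top_priority(items, priority):
--     """Single left-to-right pass over priority, using a count table for O(1)
--     membership/removal; stop as soon as one item remains."""
--     items = list(items)
--     if len(items) == 1:
--         return items[0]
--     counts = {}
--     for x in items:
--         counts[x] = counts.get(x, 0) + 1
--     total = len(items)
--     for p in priority:
--         if counts.get(p, 0):
--             counts[p] -= 1
--             total -= 1
--             if total == 1:
--                 return next((x for x in items if counts[x] > 0), None)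
--     return None
-- ===== Notes on version B (the rewrite author's own statement) =====
-- stated objective: faster
-- what changed: Replaced A's recursive restart (rescan priority from the start and relist/remove after each removal, O(n*m) membership scans) by one left-to-right pass over priority with a count table built once, decrementing counts and stopping when one item remains.
import Mathlib
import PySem

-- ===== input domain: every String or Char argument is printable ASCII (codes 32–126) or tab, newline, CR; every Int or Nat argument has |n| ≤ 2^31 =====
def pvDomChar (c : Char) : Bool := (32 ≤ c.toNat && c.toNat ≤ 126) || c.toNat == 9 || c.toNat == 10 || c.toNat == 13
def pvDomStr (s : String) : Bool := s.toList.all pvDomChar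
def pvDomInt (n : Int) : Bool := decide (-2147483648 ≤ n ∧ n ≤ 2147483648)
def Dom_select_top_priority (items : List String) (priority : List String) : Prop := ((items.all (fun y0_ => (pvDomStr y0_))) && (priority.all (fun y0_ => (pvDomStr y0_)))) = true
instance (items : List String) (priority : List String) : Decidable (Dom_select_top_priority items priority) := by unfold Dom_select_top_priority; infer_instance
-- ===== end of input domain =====

-- B replaces A's recursive restart by one counting pass over priority (faster in a timing run's measure on large inputs).

-- ===== PORT A =====
def select_top_priority (items : List String) (priority : List String) : Option String :=
  if items.length = 1 then PySem.List.pyGet? items 0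
  else
    match hf : priority.find? (fun p => items.contains p) with
    | none => none
    | some p =>
      select_top_priority ((PySem.List.remove? items p).getD items)
                          ((PySem.List.remove? priority p).getD priority)
termination_by items.length
decreasing_by
  have hp : p ∈ items := by
    have := List.find?_some hf
    simpa using this
  rw [PySem.List.remove?_eq_some_erase items p hp]
  have h1 := List.length_erase_of_mem hp
  have h2 := List.length_pos_of_mem hp
  simp
  omega

-- ===== PORT B =====
-- the early-exit scan over priority (Source B's second for loop)
def stpLoop (items : List String) (counts : PySem.Dict String Int) (total : Int) :
    List String → Option String
  | [] => none
  | p :: ps =>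
    if counts.getD p 0 ≠ 0 then
      let counts' := counts.insert p (counts.getD p 0 - 1)
      let total' := total - 1
      if total' = 1 then items.find? (fun x => decide (0 < counts'.getD x 0))
      else stpLoop items counts' total' ps
    else stpLoop items counts total ps

def select_top_priority_alt (items : List String) (priority : List String) : Option String :=
  if items.length = 1 then PySem.List.pyGet? items 0
  else
    let counts := items.foldl (fun d x => d.insert x (d.getD x 0 + 1)) PySem.Dict.empty
    stpLoop items counts (items.length : Int) priority

-- ===== PRECONDITION & SPEC =====
def Spec_select_top_priority (items : List String) (priority : List String) (out : Option String) : Prop := out = select_top_priority_alt items priority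
instance (items : List String) (priority : List String) (out : Option String) : Decidable (Spec_select_top_priority items priority out) := by unfold Spec_select_top_priority; infer_instance

-- ===== CLAIM (what is proved, stated in full; the proofs are below) =====
def Claim_equal_select_top_priority : Prop := ∀ (items : List String) (priority : List String), Dom_select_top_priority items priority → Spec_select_top_priority items priority (select_top_priority items priority)

-- ===== LEMMAS AND PROOFS =====

theorem pv_find_unique (l : List String) (p : String → Bool) (v : String)
    (hp : ∀ x, p x = true ↔ x = v) (hv : v ∈ l) : l.find? p = some v := by
  induction l with
  | nil => simp at hv
  | cons a l ih =>
    by_cases ha : a = v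
    · subst ha; simp [List.find?, (hp a).2 rfl]
    · have : p a = false := by
        cases h : p a
        · rfl
        · exact absurd ((hp a).1 h) ha
      simp [List.find?, this]
      rcases List.mem_cons.1 hv with h1 | hv
      · exact absurd h1.symm ha
      · exact ih hv

-- the main invariant: A on remaining list r (a sublist of items) with prefix of priority
-- known dead equals B's counting loop on the suffix.
theorem pv_main (items_all : List String) (pr : List String) : ∀ (pre r : List String) (counts : PySem.Dict String Int),
    r.Sublist items_all → (∀ x ∈ pre, x ∉ r) →
    (∀ x, counts.getD x 0 = (r.count x : Int)) → r.length ≠ 1 →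
    select_top_priority r (pre ++ pr) = stpLoop items_all counts (r.length : Int) pr := by
  induction pr with
  | nil =>
    intro pre r counts hsub hpre hc hlen
    rw [select_top_priority, if_neg hlen]
    have hfind : (pre ++ ([] : List String)).find? (fun p => r.contains p) = none := by
      rw [List.find?_eq_none]
      intro x hx
      simpa using hpre x (by simpa using hx)
    split
    · simp [stpLoop]
    · next p heq =>
      rw [hfind] at heq
      exact absurd heq (by simp)
  | cons p ps ih =>
    intro pre r counts hsub hpre hc hlen
    have hpredead : pre.find? (fun q => r.contains q) = none := by
      rw [List.find?_eq_none]
      intro x hx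
      simpa using hpre x hx
    by_cases hp : p ∈ r
    · -- p is found and removed
      have hfind : (pre ++ p :: ps).find? (fun q => r.contains q) = some p := by
        rw [List.find?_append, hpredead]
        simp [List.find?_cons_of_pos, hp]
      have hppre : p ∉ pre := fun h => hpre p h hp
      have hp2 : p ∈ pre ++ p :: ps := by simp
      have herase2 : (pre ++ p :: ps).erase p = pre ++ ps := by
        rw [List.erase_append_right _ hppre, List.erase_cons_head]
      have hcount : 0 < r.count p := List.count_pos_iff.2 hp
      have hlenpos : 0 < r.length := List.length_pos_of_mem hp
      have hlene : (r.erase p).length = r.length - 1 := List.length_erase_of_mem hp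
      -- A side reduces to the recursive call on (r.erase p) and (pre ++ ps)
      have hA : select_top_priority r (pre ++ p :: ps) =
          select_top_priority (r.erase p) (pre ++ ps) := by
        rw [select_top_priority, if_neg hlen]
        split
        · next heq => rw [hfind] at heq; exact absurd heq (by simp)
        · next q heq =>
          rw [hfind] at heq
          obtain hqp : q = p := by simpa using heq.symm
          rw [hqp, PySem.List.remove?_eq_some_erase r p hp,
              PySem.List.remove?_eq_some_erase (pre ++ p :: ps) p hp2, herase2]
          rfl
      -- B side takes the decrement branch
      have hcp : counts.getD p 0 ≠ 0 := by
        rw [hc p]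
        omega
      have hc' : ∀ x, (counts.insert p (counts.getD p 0 - 1)).getD x 0 = ((r.erase p).count x : Int) := by
        intro x
        rw [PySem.Dict.getD_insert]
        by_cases hxp : x = p
        · subst hxp
          rw [if_pos rfl, hc x, List.count_erase_self]
          omega
        · rw [if_neg hxp, hc x, List.count_erase_of_ne hxp]
      have htot : ((r.length : Int) - 1) = ((r.erase p).length : Int) := by
        rw [hlene]
        omega
      rw [hA]
      show _ = stpLoop items_all counts (r.length : Int) (p :: ps)
      rw [stpLoop, if_pos hcp]
      by_cases h1 : (r.erase p).length = 1
      · -- one item left: A returns its head, B scans items_all for the positive count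
        rw [if_pos (by omega : (r.length : Int) - 1 = 1)]
        obtain ⟨v, hv⟩ := List.length_eq_one_iff.1 h1
        have hvmem : v ∈ items_all := hsub.subset (List.mem_of_mem_erase (by rw [hv]; simp))
        rw [select_top_priority, if_pos h1, hv]
        rw [pv_find_unique items_all _ v ?_ hvmem]
        · simp [PySem.List.pyGet?, PySem.List.pyIdx?]
        · intro x
          rw [decide_eq_true_iff, hc' x, hv]
          by_cases hxv : x = v
          · subst hxv
            simp
          · simp [hxv, Ne.symm hxv]
      · rw [if_neg (by omega : ¬ (r.length : Int) - 1 = 1), htot]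
        exact ih pre (r.erase p) _ ((List.erase_sublist).trans hsub)
          (fun x hx hm => hpre x hx (List.mem_of_mem_erase hm)) hc' h1
    · -- p not present: both sides skip it
      have hcp : ¬ counts.getD p 0 ≠ 0 := by
        rw [hc p, List.count_eq_zero_of_not_mem hp]
        simp
      have hre : pre ++ p :: ps = (pre ++ [p]) ++ ps := by simp
      rw [stpLoop, if_neg hcp, hre]
      exact ih (pre ++ [p]) r counts hsub
        (fun x hx => by
          rcases List.mem_append.1 hx with h | h
          · exact hpre x h
          · simpa using (by simpa using h : x = p) ▸ hp) hc hlen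

-- ===== VERDICT (by name: the statement is the Claim_ definition above) =====
theorem select_top_priority_spec : Claim_equal_select_top_priority := by
  intro items priority _
  unfold Spec_select_top_priority select_top_priority_alt
  by_cases h : items.length = 1
  · rw [select_top_priority, if_pos h, if_pos h]
  · rw [if_neg h]
    have hc : ∀ x, (items.foldl (fun d x => d.insert x (d.getD x 0 + 1)) PySem.Dict.empty).getD x 0
        = (items.count x : Int) := by
      intro x
      rw [PySem.Dict.getD_foldl_insert_add_one, PySem.Dict.getD_empty]
      ring
    have := pv_main items priority [] items _ (List.Sublist.refl items) (by simp) hc h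
    simpa using this
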